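-- pv_equiv track=rewrite | github.com/MatheusNevs/code-practice | exercícios/apc/projeto_final.py | checar_responsavel
-- ===== SOURCE A (Python) =====
-- def checar_responsavel(frase):
--     ultima = frase.split('.')[-2].split()
--     nome = 'nao informado'
--     for k, palavra in enumerate(ultima):
--         if palavra[0].isupper():
--             if k == 0:
--                 nome = palavra
--             else:
--                 if ultima[k - 1][0].isupper() == False:
--                     nome = palavra
--                 else:
--                     nome += ' ' +palavra
--     return f'Responsavel: {nome.replace(",", "").strip()}'
-- ===== SOURCE B (Python) =====
-- def checar_responsavel(frase):
--     ultima = frase.split('.')[-2].split()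
--     rev = ultima[::-1]
--     while rev and not rev[0][0].isupper():
--         rev = rev[1:]
--     run = []
--     while rev and rev[0][0].isupper():
--         run.append(rev[0])
--         rev = rev[1:]
--     nome = ' '.join(run[::-1]) if run else 'nao informado'
--     return f'Responsavel: {nome.replace(",", "").strip()}'
-- ===== Notes on version B (the rewrite author's own statement) =====
-- stated objective: alternative
-- what changed: Replaces A's forward enumerate-fold with index lookbacks (ultima[k-1]) by a reverse scan: drop trailing non-capitalized words, take the last run of capitalized words, join it; no per-step index lookups.
import Mathlib
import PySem

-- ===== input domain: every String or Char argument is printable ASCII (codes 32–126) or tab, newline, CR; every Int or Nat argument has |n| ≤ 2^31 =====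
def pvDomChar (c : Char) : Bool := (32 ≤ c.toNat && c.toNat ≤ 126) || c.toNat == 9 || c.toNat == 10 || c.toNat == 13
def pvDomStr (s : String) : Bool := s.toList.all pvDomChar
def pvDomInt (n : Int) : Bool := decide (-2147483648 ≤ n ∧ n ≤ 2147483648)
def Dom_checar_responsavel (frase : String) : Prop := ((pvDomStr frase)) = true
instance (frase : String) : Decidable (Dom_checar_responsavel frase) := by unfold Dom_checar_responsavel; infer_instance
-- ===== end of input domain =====

-- B replaces A's forward enumerate-fold with lookback indexing (ultima[k-1]) by a reverse scan:
-- drop trailing non-capitalized words, take the last capitalized run, join it; same cost, different traversal.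

-- `palavra[0].isupper()` — both Pythons evaluate this only on the (always nonempty) words produced
-- by str.split(); the `none` branch (empty word = Python IndexError) is unreachable there.
def pvCap (w : String) : Bool := (PySem.Str.pyGet? w 0).elim false PySem.Chars.isupper

-- ===== PORT A =====
-- `frase.split('.')` (sep ≠ "" so split? is always `some`); `[-2]` raises IndexError when the
-- list has < 2 parts — those inputs are excluded by Pre_; the port takes a "" default there.
def checar_responsavel (frase : String) : String :=
  let parts := (PySem.Str.split? frase ".").getD []
  let ultima := PySem.Str.split₀ ((PySem.List.pyGet? parts (-2)).elim "" id)
  let nome := (PySem.List.enumerate ultima 0).foldl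
    (fun nome kp =>
      if pvCap kp.2 then
        if kp.1 == 0 then kp.2
        else
          if ((PySem.List.pyGet? ultima (kp.1 - 1)).elim false pvCap) == false then kp.2
          else nome ++ (" " ++ kp.2)
      else nome)
    "nao informado"
  "Responsavel: " ++ PySem.Str.strip (PySem.Str.replace nome "," "")

-- ===== PORT B =====
def checar_responsavel_alt (frase : String) : String :=
  let parts := (PySem.Str.split? frase ".").getD []
  let ultima := PySem.Str.split₀ ((PySem.List.pyGet? parts (-2)).elim "" id)
  -- rev = ultima[::-1]; the two while loops are dropWhile / takeWhile on rev
  let run := (ultima.reverse.dropWhile (fun w => !pvCap w)).takeWhile pvCap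
  let nome := if run.isEmpty then "nao informado" else PySem.Str.join " " run.reverse
  "Responsavel: " ++ PySem.Str.strip (PySem.Str.replace nome "," "")

-- ===== PRECONDITION & SPEC =====
-- Pre_ excludes exactly the inputs with no '.' in frase, where `frase.split('.')[-2]`
-- raises IndexError in both A and B.
def Pre_checar_responsavel (frase : String) : Prop := PySem.Str.isIn "." frase = true
instance (frase : String) : Decidable (Pre_checar_responsavel frase) := by
  unfold Pre_checar_responsavel; infer_instance

def pvWitness_checar_responsavel : String := "O responsavel e Joao Silva."

def Spec_checar_responsavel (frase : String) (out : String) : Prop := out = checar_responsavel_alt frase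
instance (frase : String) (out : String) : Decidable (Spec_checar_responsavel frase out) := by
  unfold Spec_checar_responsavel; infer_instance

-- ===== CLAIM (what is proved, stated in full; the proofs are below) =====
def Claim_equal_checar_responsavel : Prop := ∀ (frase : String), Dom_checar_responsavel frase → Pre_checar_responsavel frase → Spec_checar_responsavel frase (checar_responsavel frase)

-- ===== LEMMAS AND PROOFS =====

-- the A-side loop body, abstracted over the list it indexes into
def pvStep (ultima : List String) (nome : String) (kp : Int × String) : String :=
  if pvCap kp.2 then
    if kp.1 == 0 then kp.2
    else
      if ((PySem.List.pyGet? ultima (kp.1 - 1)).elim false pvCap) == false then kp.2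
      else nome ++ (" " ++ kp.2)
  else nome

-- the B-side "last capitalized run" computation
def pvAlt (ws : List String) : String :=
  let run := (ws.reverse.dropWhile (fun w => !pvCap w)).takeWhile pvCap
  if run.isEmpty then "nao informado" else PySem.Str.join " " run.reverse

lemma pvChars_join_append_singleton (sep : List Char) (t : List (List Char)) (w : List Char)
    (ht : t ≠ []) :
    PySem.Chars.join sep (t ++ [w]) = PySem.Chars.join sep t ++ sep ++ w := by
  induction t with
  | nil => exact absurd rfl ht
  | cons x xs ih =>
    cases xs with
    | nil => simp [PySem.Chars.join_singleton, PySem.Chars.join_cons_cons]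
    | cons y ys =>
      have h := ih (by simp)
      simp only [List.cons_append, PySem.Chars.join_cons_cons] at *
      rw [h]
      simp [List.append_assoc]

lemma pvJoin_singleton (w : String) : PySem.Str.join " " [w] = w := by
  apply String.toList_inj.mp
  rw [PySem.Str.toList_join]
  simp [PySem.Chars.join_singleton]

lemma pvJoin_append_singleton (t : List String) (w : String) (ht : t ≠ []) :
    PySem.Str.join " " (t ++ [w]) = PySem.Str.join " " t ++ (" " ++ w) := by
  apply String.toList_inj.mp
  simp only [String.toList_append, PySem.Str.toList_join, List.map_append, List.map]
  rw [pvChars_join_append_singleton _ _ _ (by simpa using ht)]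
  simp [List.append_assoc]

lemma pvFoldl_congr {α β : Type} (l : List β) (f g : α → β → α) (a : α)
    (h : ∀ acc x, x ∈ l → f acc x = g acc x) : l.foldl f a = l.foldl g a := by
  induction l generalizing a with
  | nil => rfl
  | cons x xs ih =>
    simp only [List.foldl_cons]
    rw [h a x (by simp)]
    exact ih _ (fun acc y hy => h acc y (by simp [hy]))

-- the step only looks back, so indexing into ws ++ [w] agrees with indexing into ws
lemma pvStep_prefix (ws : List String) (w : String) (nome : String) (kp : Int × String)
    (hk : kp ∈ PySem.List.enumerate ws 0) :
    pvStep (ws ++ [w]) nome kp = pvStep ws nome kp := by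
  rw [PySem.List.mem_enumerate_iff] at hk
  obtain ⟨k, hklt, rfl⟩ := hk
  unfold pvStep
  dsimp only
  cases k with
  | zero => simp
  | succ j =>
    have hidx : (0 : Int) + ↑(j + 1) - 1 = (↑j : Int) := by push_cast; ring
    have hj : j < ws.length := Nat.lt_of_succ_lt hklt
    have hget : PySem.List.pyGet? (ws ++ [w]) ((0 : Int) + ↑(j + 1) - 1)
        = PySem.List.pyGet? ws ((0 : Int) + ↑(j + 1) - 1) := by
      rw [hidx, PySem.List.pyGet?_natCast, PySem.List.pyGet?_natCast,
        List.getElem?_append_left hj]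
    rw [hget]

lemma pvFold_eq_alt (ws : List String) :
    (PySem.List.enumerate ws 0).foldl (pvStep ws) "nao informado" = pvAlt ws := by
  induction ws using List.reverseRecOn with
  | nil => simp [PySem.List.enumerate_nil, pvAlt]
  | append_singleton ws w ih =>
    rw [PySem.List.enumerate_append, List.foldl_append,
      pvFoldl_congr (PySem.List.enumerate ws 0) (pvStep (ws ++ [w])) (pvStep ws)
        "nao informado" (fun acc x hx => pvStep_prefix ws w acc x hx), ih,
      PySem.List.enumerate_cons, PySem.List.enumerate_nil]
    simp only [List.foldl_cons, List.foldl_nil]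
    unfold pvStep
    dsimp only
    cases hcw : pvCap w with
    | false =>
      simp only [Bool.false_eq_true, if_false]
      unfold pvAlt
      simp [hcw]
    | true =>
      simp only [if_true]
      cases hrev : ws.reverse with
      | nil =>
        have hws : ws = [] := by simpa using congrArg List.reverse hrev
        subst hws
        unfold pvAlt
        simp [hcw, pvJoin_singleton]
      | cons l r =>
        have hws : ws = r.reverse ++ [l] := by simpa using congrArg List.reverse hrev
        have hlen : ws.length = r.length + 1 := by rw [hws]; simp
        have hne : (((0 : Int) + ↑ws.length) == 0) = false := by
          rw [hlen]; simp only [beq_eq_false_iff_ne, ne_eq]; push_cast; omega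
        have hidx : (0 : Int) + ↑ws.length - 1 = (↑r.length : Int) := by
          rw [hlen]; push_cast; ring
        have hget : PySem.List.pyGet? (ws ++ [w]) ((0 : Int) + ↑ws.length - 1) = some l := by
          rw [hidx, PySem.List.pyGet?_natCast, hws]
          have h1 : r.length < (r.reverse ++ [l]).length := by simp
          rw [List.getElem?_append_left h1]
          have h2 : (r.reverse ++ [l])[r.reverse.length]? = some l :=
            List.getElem?_concat_length
          simpa using h2
        simp only [hne, Bool.false_eq_true, if_false, hget, Option.elim]
        have hrevw : (ws ++ [w]).reverse = w :: l :: r := by rw [hws]; simp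
        cases hcl : pvCap l with
        | false =>
          simp only [beq_self_eq_true, if_true]
          unfold pvAlt
          rw [hrevw]
          simp [hcw, hcl, pvJoin_singleton]
        | true =>
          rw [show ((true : Bool) == false) = false from rfl]
          simp only [Bool.false_eq_true, if_false]
          have hAws : pvAlt ws = PySem.Str.join " " ((l :: r.takeWhile pvCap).reverse) := by
            unfold pvAlt
            rw [hrev]
            simp [hcl]
          have hAwsw : pvAlt (ws ++ [w])
              = PySem.Str.join " " ((l :: r.takeWhile pvCap).reverse ++ [w]) := by
            unfold pvAlt
            rw [hrevw]
            simp [hcw, hcl]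
          rw [hAws, hAwsw, pvJoin_append_singleton _ _ (by simp)]

-- ===== VERDICT (by name: the statement is the Claim_ definition above) =====
theorem checar_responsavel_spec : Claim_equal_checar_responsavel := by
  intro frase _ _
  unfold Spec_checar_responsavel checar_responsavel checar_responsavel_alt
  exact congrArg
    (fun s => "Responsavel: " ++ PySem.Str.strip (PySem.Str.replace s "," ""))
    (pvFold_eq_alt
      (PySem.Str.split₀
        ((PySem.List.pyGet? ((PySem.Str.split? frase ".").getD []) (-2)).elim "" id)))
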